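-- pv_equiv track=rewrite | github.com/felimikli/sintaxis_tp1 | lexer.py | afd_id
-- ===== SOURCE A (Python) =====
-- ESTADO_FINAL = "ESTADO FINAL"
--
-- ESTADO_NO_FINAL = "ESTADO NO FINAL"
--
-- ESTADO_TRAMPA = "ESTADO TRAMPA"
--
-- LETRAS_MIN = set("abcdefghijklmnopqrstuvwxyz")
--
-- LETRAS_MAY = set("ABCDEFGHIJKLMNOPQRSTUVWXYZ")
--
-- NUMEROS = set("0123456789")
--
-- def afd_id(lexema):
--         estado = 0
--         estados_finales = [1]
--         funcion_estados = [{},{}]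
--         for c in LETRAS_MIN | LETRAS_MAY:
--                 funcion_estados[0][c] = 1
--                 funcion_estados[1][c] = 1
--         for c in NUMEROS:
--                 funcion_estados[1][c] = 1
--
--         for char in lexema:
--                 transicion = funcion_estados[estado]
--                 if char in transicion:
--                         estado = transicion[char]
--                 else:
--                         return ESTADO_TRAMPA
--
--         if estado in estados_finales:
--                 return ESTADO_FINAL
--         else:
--                 return ESTADO_NO_FINAL
-- ===== SOURCE B (Python) =====
-- ESTADO_FINAL = "ESTADO FINAL"
-- ESTADO_NO_FINAL = "ESTADO NO FINAL"
-- ESTADO_TRAMPA = "ESTADO TRAMPA"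
--
-- LETRAS = set("abcdefghijklmnopqrstuvwxyz") | set("ABCDEFGHIJKLMNOPQRSTUVWXYZ")
-- ALFANUM = LETRAS | set("0123456789")
--
-- def afd_id(lexema):
--     if not lexema:
--         return ESTADO_NO_FINAL
--     if lexema[0] not in LETRAS:
--         return ESTADO_TRAMPA
--     if all(ch in ALFANUM for ch in lexema[1:]):
--         return ESTADO_FINAL
--     return ESTADO_TRAMPA
-- ===== Notes on version B (the rewrite author's own statement) =====
-- stated objective: simpler
-- what changed: Drops the per-call construction of the two-state DFA transition dicts and the state variable; B guards the empty string, checks the first character is a letter, then checks the rest are alphanumeric with all().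
import Mathlib
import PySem

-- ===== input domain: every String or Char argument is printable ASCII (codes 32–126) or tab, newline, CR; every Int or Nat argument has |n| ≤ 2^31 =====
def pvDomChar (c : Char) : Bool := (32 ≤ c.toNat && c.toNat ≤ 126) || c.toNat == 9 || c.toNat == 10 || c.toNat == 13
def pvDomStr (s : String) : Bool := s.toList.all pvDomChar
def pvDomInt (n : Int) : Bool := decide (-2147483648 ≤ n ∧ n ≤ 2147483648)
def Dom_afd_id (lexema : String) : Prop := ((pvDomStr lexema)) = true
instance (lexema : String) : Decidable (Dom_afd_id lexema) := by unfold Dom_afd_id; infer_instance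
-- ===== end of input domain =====

-- B replaces A's per-call DFA transition-dict construction and state loop by a head-letter
-- check plus an all-alphanumeric check on the tail (objective: simpler).

-- module-level constants shared by both ports
def ESTADO_FINAL : String := "ESTADO FINAL"
def ESTADO_NO_FINAL : String := "ESTADO NO FINAL"
def ESTADO_TRAMPA : String := "ESTADO TRAMPA"
def LETRAS_MIN : List Char := "abcdefghijklmnopqrstuvwxyz".toList
def LETRAS_MAY : List Char := "ABCDEFGHIJKLMNOPQRSTUVWXYZ".toList
def NUMEROS : List Char := "0123456789".toList

-- ===== PORT A =====
-- Python iterates the SET `LETRAS_MIN | LETRAS_MAY` in unspecified order when building the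
-- dicts; every key is mapped to the same value 1, so the resulting dict is independent of
-- that order and we build it by folding over LETRAS_MIN ++ LETRAS_MAY.
def afdLetras : List Char := LETRAS_MIN ++ LETRAS_MAY

def afdTrans0 : PySem.Dict Char Int :=
  afdLetras.foldl (fun d c => d.insert c 1) PySem.Dict.empty

def afdTrans1 : PySem.Dict Char Int :=
  NUMEROS.foldl (fun d c => d.insert c 1)
    (afdLetras.foldl (fun d c => d.insert c 1) PySem.Dict.empty)

-- the for-loop over lexema with its early `return ESTADO_TRAMPA`; estado is only ever 0 or 1,
-- so the list indexing funcion_estados[estado] is rendered as the two-way choice.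
def afdLoop : Int → List Char → String
  | estado, [] => if List.contains [(1 : Int)] estado then ESTADO_FINAL else ESTADO_NO_FINAL
  | estado, c :: rest =>
    let transicion := if estado = 0 then afdTrans0 else afdTrans1
    match transicion.get? c with
    | some e => afdLoop e rest
    | none => ESTADO_TRAMPA

def afd_id (lexema : String) : String := afdLoop 0 lexema.toList

-- ===== PORT B =====
def LETRAS : List Char := LETRAS_MIN ++ LETRAS_MAY
def ALFANUM : List Char := LETRAS ++ NUMEROS

def afd_id_alt (lexema : String) : String :=
  match lexema.toList with
  | [] => ESTADO_NO_FINAL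
  | c :: rest =>
    if LETRAS.contains c then
      if rest.all (fun ch => ALFANUM.contains ch) then ESTADO_FINAL else ESTADO_TRAMPA
    else ESTADO_TRAMPA

-- ===== PRECONDITION & SPEC =====
def Spec_afd_id (lexema : String) (out : String) : Prop := out = afd_id_alt lexema
instance (lexema : String) (out : String) : Decidable (Spec_afd_id lexema out) := by unfold Spec_afd_id; infer_instance

-- ===== CLAIM (what is proved, stated in full; the proofs are below) =====
def Claim_equal_afd_id : Prop := ∀ (lexema : String), Dom_afd_id lexema → Spec_afd_id lexema (afd_id lexema)

-- ===== LEMMAS AND PROOFS =====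

theorem get?_foldl_insert_one (l : List Char) (d : PySem.Dict Char Int) (c : Char) :
    (l.foldl (fun d c => d.insert c (1 : Int)) d).get? c
      = if c ∈ l then some 1 else d.get? c := by
  induction l generalizing d with
  | nil => simp
  | cons a l ih =>
    simp only [List.foldl_cons, ih, List.mem_cons, PySem.Dict.get?_insert]
    by_cases h : c ∈ l <;> by_cases h' : c = a <;> simp [h, h']

theorem afdTrans0_get (c : Char) :
    afdTrans0.get? c = if c ∈ afdLetras then some 1 else none := by
  simp [afdTrans0, get?_foldl_insert_one]

theorem afdTrans1_get (c : Char) :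
    afdTrans1.get? c = if c ∈ NUMEROS ∨ c ∈ afdLetras then some 1 else none := by
  simp only [afdTrans1, get?_foldl_insert_one]
  by_cases h : c ∈ NUMEROS <;> by_cases h' : c ∈ afdLetras <;> simp [h, h']

set_option maxRecDepth 4000 in
theorem afdLoop_one (rest : List Char) :
    afdLoop 1 rest
      = if rest.all (fun ch => ALFANUM.contains ch) then ESTADO_FINAL else ESTADO_TRAMPA := by
  induction rest with
  | nil => rfl
  | cons c rest ih =>
    have hstep : afdLoop 1 (c :: rest)
        = (match afdTrans1.get? c with
           | some e => afdLoop e rest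
           | none => ESTADO_TRAMPA) := by
      simp only [afdLoop]
      rw [if_neg (by decide : ¬ (1 : Int) = 0)]
    rw [hstep, afdTrans1_get, List.all_cons]
    by_cases h : c ∈ NUMEROS ∨ c ∈ afdLetras
    · have hc : ALFANUM.contains c = true := by
        simp only [afdLetras, List.mem_append] at h
        simp only [ALFANUM, LETRAS, List.contains_eq_mem, List.mem_append, decide_eq_true_eq]
        exact h.symm
      rw [if_pos h, hc, Bool.true_and]
      exact ih
    · have hc : ALFANUM.contains c = false := by
        simp only [afdLetras, List.mem_append] at h
        simp only [ALFANUM, LETRAS, List.contains_eq_mem, List.mem_append,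
          decide_eq_false_iff_not]
        exact fun g => h g.symm
      rw [if_neg h, hc, Bool.false_and, if_neg Bool.false_ne_true]

-- ===== VERDICT (by name: the statement is the Claim_ definition above) =====
set_option maxRecDepth 4000 in
theorem afd_id_spec : Claim_equal_afd_id := by
  intro lexema _
  unfold Spec_afd_id afd_id
  cases h : lexema.toList with
  | nil =>
    have halt : afd_id_alt lexema = ESTADO_NO_FINAL := by
      unfold afd_id_alt
      rw [h]
    rw [halt]
    rfl
  | cons c rest =>
    have hstep : afdLoop 0 (c :: rest)
        = (match afdTrans0.get? c with
           | some e => afdLoop e rest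
           | none => ESTADO_TRAMPA) := by
      simp only [afdLoop]
      rw [if_pos trivial]
    have halt : afd_id_alt lexema
        = if LETRAS.contains c then
            (if rest.all (fun ch => ALFANUM.contains ch) then ESTADO_FINAL else ESTADO_TRAMPA)
          else ESTADO_TRAMPA := by
      unfold afd_id_alt
      rw [h]
    rw [halt, hstep, afdTrans0_get]
    by_cases hc : c ∈ afdLetras
    · have hm : LETRAS.contains c = true := by
        simp only [afdLetras, List.mem_append] at hc
        simp only [LETRAS, List.contains_eq_mem, List.mem_append, decide_eq_true_eq]
        exact hc
      rw [if_pos hc, hm, if_pos rfl]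
      exact afdLoop_one rest
    · have hm : LETRAS.contains c = false := by
        simp only [afdLetras, List.mem_append] at hc
        simp only [LETRAS, List.contains_eq_mem, List.mem_append, decide_eq_false_iff_not]
        exact hc
      rw [if_neg hc, hm, if_neg Bool.false_ne_true]
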